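-- pv_equiv track=rewrite | github.com/darboledas/criptoclasica | monoalphabetic/mixed_alphabet.py | alfabeto_columnar
-- ===== SOURCE A (Python) =====
-- import unicodedata
-- import string
--
-- ALFABETO = "ABCDEFGHIJKLMNOPQRSTUVWXYZ"
--
-- def normalizar(s: str) -> str:
--     s = unicodedata.normalize("NFD", s.upper())
--     s = "".join(ch for ch in s if unicodedata.category(ch) != "Mn")
--     return "".join(ch for ch in s if ch in string.ascii_uppercase)
--
-- def alfabeto_columnar(clave: str) -> str:
--     clave = normalizar(clave)
--     n = len(clave)
--
--     resto = "".join(ch for ch in ALFABETO if ch not in clave)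
--     texto = clave + resto
--
--     filas = []
--     while texto:
--         filas.append(texto[:n])
--         texto = texto[n:]
--
--     order = sorted(range(n), key=lambda i: clave[i])
--
--     salida = []
--     for c in order:
--         for fila in filas:
--             if c < len(fila):
--                 salida.append(fila[c])
--
--     return "".join(salida)
-- ===== SOURCE B (Python) =====
-- import unicodedata
-- import string
--
-- ALFABETO = "ABCDEFGHIJKLMNOPQRSTUVWXYZ"
--
-- def normalizar(s: str) -> str:
--     s = unicodedata.normalize("NFD", s.upper())
--     s = "".join(ch for ch in s if unicodedata.category(ch) != "Mn")
--     return "".join(ch for ch in s if ch in string.ascii_uppercase)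
--
-- def alfabeto_columnar(clave: str) -> str:
--     # One pass: distribute the extended alphabet round-robin into n column
--     # buckets, then emit the buckets in keyword-sorted order.
--     clave = normalizar(clave)
--     n = len(clave)
--     resto = "".join(ch for ch in ALFABETO if ch not in clave)
--     cols = [""] * n
--     for i, ch in enumerate(clave + resto):
--         cols[i % n] += ch
--     order = sorted(range(n), key=lambda i: clave[i])
--     return "".join(cols[c] for c in order)
-- ===== Notes on version B (the rewrite author's own statement) =====
-- stated objective: simpler
-- what changed: Replaces A's row-chunking plus nested filas-scan per sorted column with a single round-robin pass that distributes clave+resto into n column buckets (cols[i % n] += ch) and then joins the buckets in keyword-sorted order.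
import Mathlib
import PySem

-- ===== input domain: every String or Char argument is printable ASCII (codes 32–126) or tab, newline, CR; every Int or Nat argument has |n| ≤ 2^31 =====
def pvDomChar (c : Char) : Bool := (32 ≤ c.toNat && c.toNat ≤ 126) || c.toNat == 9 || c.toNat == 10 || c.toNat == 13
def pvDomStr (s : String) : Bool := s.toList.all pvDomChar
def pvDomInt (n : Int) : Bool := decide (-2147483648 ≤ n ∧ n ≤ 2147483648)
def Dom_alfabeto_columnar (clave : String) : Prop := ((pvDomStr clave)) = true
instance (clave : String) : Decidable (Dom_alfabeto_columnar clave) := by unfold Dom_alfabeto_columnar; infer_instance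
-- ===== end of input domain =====

-- B replaces A's row-chunking plus nested column scan by a single round-robin pass that
-- distributes the extended alphabet into n column buckets (objective: simpler).

-- ===== PORT A =====
-- ALFABETO (module constant); string.ascii_uppercase is the same 26 letters
def pvAlfabeto : List Char := "ABCDEFGHIJKLMNOPQRSTUVWXYZ".toList

-- normalizar: s.upper(), NFD, drop combining marks, keep ascii_uppercase.
-- On the printable-ASCII domain NFD is the identity and no character has category Mn,
-- so the port is upper() followed by the A–Z membership filter (exact on Dom).
def pvNormalizar (s : String) : List Char :=
  (PySem.Chars.upper s.toList).filter (fun ch => pvAlfabeto.contains ch)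

-- the 'while texto: filas.append(texto[:n]); texto = texto[n:]' loop.
-- Totality guard: when n = 0 Python's loop never terminates (excluded by Pre_).
def pvChunk (n : Nat) : List Char → List (List Char)
  | [] => []
  | x :: rest =>
    if _h : n = 0 then []
    else (x :: rest).take n :: pvChunk n ((x :: rest).drop n)
termination_by texto => texto.length
decreasing_by simp; omega

def alfabeto_columnar (clave : String) : String :=
  let claveN := pvNormalizar clave
  let n := claveN.length
  let resto := pvAlfabeto.filter (fun ch => !claveN.contains ch)
  let texto := claveN ++ resto
  let filas := pvChunk n texto
  -- sorted(range(n), key=lambda i: clave[i]); i is always in range, default never read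
  let order := PySem.List.sorted (PySem.List.pyRange 0 (n : Int) 1) (fun i => PySem.List.pyGetD claveN i ' ') false
  let salida := order.foldl (fun acc c =>
    filas.foldl (fun acc fila =>
      if c < (fila.length : Int) then acc ++ [PySem.List.pyGetD fila c ' '] else acc) acc) []
  String.ofList salida

-- ===== PORT B =====
def alfabeto_columnar_alt (clave : String) : String :=
  let claveN := pvNormalizar clave
  let n := claveN.length
  let resto := pvAlfabeto.filter (fun ch => !claveN.contains ch)
  -- cols = [""] * n; for i, ch in enumerate(clave + resto): cols[i % n] += ch
  -- (when n = 0 Python raises ZeroDivisionError; excluded by Pre_)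
  let cols := (PySem.List.enumerate (claveN ++ resto) 0).foldl
    (fun cols p =>
      let m := PySem.Int.mod p.1 (n : Int)
      PySem.List.pySetD cols m (PySem.List.pyGetD cols m [] ++ [p.2]))
    (List.replicate n ([] : List Char))
  let order := PySem.List.sorted (PySem.List.pyRange 0 (n : Int) 1) (fun i => PySem.List.pyGetD claveN i ' ') false
  String.ofList (order.foldl (fun acc c => acc ++ PySem.List.pyGetD cols c []) [])

-- ===== PRECONDITION & SPEC =====
-- Pre_ requires the NORMALIZED key to be nonempty: when normalizar(clave) is empty (n = 0)
-- A's while-loop never terminates (no value is returned; B raises ZeroDivisionError there).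
def Pre_alfabeto_columnar (clave : String) : Prop :=
  pvNormalizar clave ≠ []
instance (clave : String) : Decidable (Pre_alfabeto_columnar clave) := by unfold Pre_alfabeto_columnar; infer_instance

def pvWitness_alfabeto_columnar : String := "CLAVE"

def Spec_alfabeto_columnar (clave : String) (out : String) : Prop := out = alfabeto_columnar_alt clave
instance (clave : String) (out : String) : Decidable (Spec_alfabeto_columnar clave out) := by unfold Spec_alfabeto_columnar; infer_instance

-- ===== CLAIM (what is proved, stated in full; the proofs are below) =====
def Claim_equal_alfabeto_columnar : Prop := ∀ (clave : String), Dom_alfabeto_columnar clave → Pre_alfabeto_columnar clave → Spec_alfabeto_columnar clave (alfabeto_columnar clave)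

-- ===== LEMMAS AND PROOFS =====

-- the column read off A's chunk rows: every n-th character starting at position c
def pvStride (n c : Nat) : List Char → List Char
  | [] => []
  | x :: rest =>
    if _h : n = 0 then []
    else (if c < (x :: rest).length then [(x :: rest).getD c ' '] else [])
           ++ pvStride n c ((x :: rest).drop n)
termination_by texto => texto.length
decreasing_by simp; omega

-- the column bucket built by B's round-robin pass, indices counted from s
def pvColG (n c : Nat) : List Char → Nat → List Char
  | [], _ => []
  | x :: xs, s => (if s % n = c then [x] else []) ++ pvColG n c xs (s + 1)

theorem pvColG_append (n c : Nat) (xs ys : List Char) (s : Nat) :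
    pvColG n c (xs ++ ys) s = pvColG n c xs s ++ pvColG n c ys (s + xs.length) := by
  induction xs generalizing s with
  | nil => simp [pvColG]
  | cons x xs ih =>
    simp only [List.cons_append, pvColG, ih, List.append_assoc, List.length_cons]
    ring_nf

theorem pvColG_shift (n c : Nat) (xs : List Char) (s : Nat) :
    pvColG n c xs (s + n) = pvColG n c xs s := by
  induction xs generalizing s with
  | nil => rfl
  | cons x xs ih =>
    simp only [pvColG, Nat.add_mod_right]
    have : s + n + 1 = (s + 1) + n := by omega
    rw [this, ih]

theorem pvColG_small (n c : Nat) (hc : c < n) (xs : List Char) (s : Nat)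
    (h : s + xs.length ≤ n) :
    pvColG n c xs s = if s ≤ c ∧ c < s + xs.length then [xs.getD (c - s) ' '] else [] := by
  induction xs generalizing s with
  | nil => simp [pvColG]
  | cons x xs ih =>
    simp only [List.length_cons] at h
    have hs : s % n = s := Nat.mod_eq_of_lt (by omega)
    simp only [pvColG, hs, ih (s + 1) (by omega)]
    by_cases hsc : s = c
    · subst hsc
      rw [if_pos rfl, if_neg (show ¬ (s + 1 ≤ s ∧ s < s + 1 + xs.length) by omega),
          if_pos (show s ≤ s ∧ s < s + (x :: xs).length by simp only [List.length_cons]; omega)]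
      simp
    · rw [if_neg hsc]
      by_cases hin : s + 1 ≤ c ∧ c < s + 1 + xs.length
      · rw [if_pos hin,
            if_pos (show s ≤ c ∧ c < s + (x :: xs).length by simp only [List.length_cons]; omega)]
        have hcs : c - s = (c - (s + 1)) + 1 := by omega
        simp [hcs]
      · rw [if_neg hin,
            if_neg (show ¬ (s ≤ c ∧ c < s + (x :: xs).length) by simp only [List.length_cons]; omega)]
        rfl

theorem pvStride_eq_colG (n c : Nat) (hn : 0 < n) (hc : c < n) (texto : List Char) :
    pvStride n c texto = pvColG n c texto 0 := by
  generalize hL : texto.length = L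
  induction L using Nat.strong_induction_on generalizing texto with
  | _ L ih =>
    match texto with
    | [] => simp [pvStride, pvColG]
    | x :: rest =>
      have hlc : (x :: rest).length = rest.length + 1 := by simp
      rw [pvStride, dif_neg (by omega : ¬ n = 0)]
      have hsplit : x :: rest = (x :: rest).take n ++ (x :: rest).drop n := (List.take_append_drop n _).symm
      conv_rhs => rw [hsplit]
      rw [pvColG_append, List.length_take]
      by_cases hlen : (x :: rest).length ≤ n
      · have hdrop : (x :: rest).drop n = [] := List.drop_eq_nil_of_le hlen
        have htake : (x :: rest).take n = x :: rest := List.take_of_length_le hlen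
        rw [hdrop, htake]
        rw [pvColG_small n c hc (x :: rest) 0 (by simpa using hlen)]
        simp [pvStride, pvColG]
      · have hlen' : n < (x :: rest).length := by omega
        have hmin : min n (x :: rest).length = n := by omega
        rw [hmin, pvColG_shift n c _ 0]
        have hLd : (List.drop n (x :: rest)).length < L := by
          rw [← hL]; simp only [List.length_drop, List.length_cons]; omega
        rw [ih _ hLd _ rfl]
        congr 1
        rw [if_pos (show c < (x :: rest).length by omega)]
        have htl : (List.take n (x :: rest)).length = n := by simp; omega
        rw [pvColG_small n c hc _ 0 (by rw [htl]; omega)]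
        rw [if_pos (show 0 ≤ c ∧ c < 0 + (List.take n (x :: rest)).length by rw [htl]; omega)]
        simp [List.getD, hc]

-- A's filter/map over the chunk rows is exactly the stride column
theorem chunk_col (n c : Nat) (hn : 0 < n) (hc : c < n) (texto : List Char) :
    (((pvChunk n texto).filter (fun f => decide ((c : Int) < (f.length : Int)))).map
        (fun f => PySem.List.pyGetD f (c : Int) ' '))
      = pvStride n c texto := by
  generalize hL : texto.length = L
  induction L using Nat.strong_induction_on generalizing texto with
  | _ L ih =>
    match texto with
    | [] => simp [pvChunk, pvStride]
    | x :: rest =>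
      rw [pvChunk, dif_neg (by omega : ¬ n = 0), pvStride, dif_neg (by omega : ¬ n = 0)]
      rw [List.filter_cons]
      have hLd : (List.drop n (x :: rest)).length < L := by
        rw [← hL]; simp only [List.length_drop, List.length_cons]; omega
      by_cases hcl : c < (x :: rest).length
      · have h1 : c < (List.take n (x :: rest)).length := by simp only [List.length_take]; omega
        have hkeep : decide ((c : Int) < ((List.take n (x :: rest)).length : Int)) = true :=
          decide_eq_true (by exact_mod_cast h1)
        rw [if_pos hkeep, List.map_cons, ih _ hLd _ rfl, if_pos hcl]
        congr 1
        rw [PySem.List.pyGetD_natCast]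
        simp [List.getD, hc]
      · have h1 : ¬ c < (List.take n (x :: rest)).length := by simp only [List.length_take]; omega
        have hnkeep : decide ((c : Int) < ((List.take n (x :: rest)).length : Int)) = false :=
          decide_eq_false (by exact_mod_cast h1)
        rw [if_neg (show ¬ (decide ((c : Int) < ((List.take n (x :: rest)).length : Int)) = true) from by
          rw [hnkeep]; exact Bool.false_ne_true)]
        rw [ih _ hLd _ rfl, if_neg hcl, List.nil_append]

-- B's fold invariant: after distributing texto (indices from s), bucket c grew by pvColG
theorem bucket_invariant (n : Nat) (hn : 0 < n) (texto : List Char) :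
    ∀ (s : Nat) (cols : List (List Char)), cols.length = n →
      ∀ c : Nat, c < n →
        PySem.List.pyGetD
          ((PySem.List.enumerate texto (s : Int)).foldl
            (fun cols p =>
              PySem.List.pySetD cols (PySem.Int.mod p.1 (n : Int))
                (PySem.List.pyGetD cols (PySem.Int.mod p.1 (n : Int)) [] ++ [p.2])) cols)
          (c : Int) []
        = PySem.List.pyGetD cols (c : Int) [] ++ pvColG n c texto s := by
  induction texto with
  | nil => intro s cols hlen c hc; simp [pvColG, PySem.List.enumerate]
  | cons x xs ih =>
    intro s cols hlen c hc
    rw [PySem.List.enumerate_cons, List.foldl_cons]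
    have hmod : PySem.Int.mod (s : Int) (n : Int) = ((s % n : Nat) : Int) := PySem.Int.mod_natCast s n
    have hlt : s % n < n := Nat.mod_lt _ hn
    simp only [hmod, PySem.List.pySetD_natCast]
    have hs1 : ((s : Int) + 1) = ((s + 1 : Nat) : Int) := by push_cast; ring
    rw [hs1, ih (s + 1) _ (by simp [hlen]) c hc]
    rw [PySem.List.pyGetD_natCast, PySem.List.pyGetD_natCast, PySem.List.pyGetD_natCast]
    simp only [pvColG]
    by_cases hec : s % n = c
    · subst hec
      have hlt' : s % n < cols.length := by rw [hlen]; exact hlt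
      rw [show ((cols.set (s % n) (cols.getD (s % n) [] ++ [x])).getD (s % n) [] = cols.getD (s % n) [] ++ [x]) from by
        simp [List.getD, hlt']]
      simp [List.append_assoc]
    · rw [show ((cols.set (s % n) (cols.getD (s % n) [] ++ [x])).getD c [] = cols.getD c []) from by
        simp [List.getD, hec]]
      simp [hec]

-- ===== VERDICT (by name: the statement is the Claim_ definition above) =====
theorem alfabeto_columnar_spec : Claim_equal_alfabeto_columnar := by
  intro clave _hdom _hpre
  show alfabeto_columnar clave = alfabeto_columnar_alt clave
  unfold alfabeto_columnar alfabeto_columnar_alt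
  dsimp only
  congr 1
  apply PySem.List.foldl_congr_mem
  intro acc c hcmem
  have hcr : c ∈ PySem.List.pyRange 0 ((pvNormalizar clave).length : Int) 1 :=
    (PySem.List.mem_sorted _ _ _ _).mp hcmem
  have hcb : 0 ≤ c ∧ c < ((pvNormalizar clave).length : Int) := by
    have := PySem.List.mem_pyRange_one.mp hcr
    simpa using this
  have hc0 : 0 < (pvNormalizar clave).length := by omega
  have hcc : c = ((c.toNat : Nat) : Int) := by omega
  have hcn : c.toNat < (pvNormalizar clave).length := by omega
  rw [hcc]
  have hA := PySem.List.foldl_append_if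
      (fun f : List Char => decide (((c.toNat : Nat) : Int) < (f.length : Int)))
      (fun f => PySem.List.pyGetD f ((c.toNat : Nat) : Int) ' ')
      (pvChunk (pvNormalizar clave).length
        (pvNormalizar clave ++ pvAlfabeto.filter (fun ch => !(pvNormalizar clave).contains ch))) acc
  simp only [decide_eq_true_eq] at hA
  rw [hA]
  congr 1
  rw [chunk_col _ c.toNat hc0 hcn _, pvStride_eq_colG _ c.toNat hc0 hcn _]
  have hB := bucket_invariant (pvNormalizar clave).length hc0
      (pvNormalizar clave ++ pvAlfabeto.filter (fun ch => !(pvNormalizar clave).contains ch)) 0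
      (List.replicate (pvNormalizar clave).length []) (by simp) c.toNat hcn
  simp only [Nat.cast_zero] at hB
  rw [hB, PySem.List.pyGetD_natCast]
  simp
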